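-- pv_equiv track=rewrite | github.com/nd-cse-30872-su25/contest-jacobo-vera | challengeC/program.py | build_options
-- ===== SOURCE A (Python) =====
-- ops = ['+', '-', '*']
--
-- expression = "(((9 {} 8) {} 7) {} 6) {} (5 {} (4 {} (3 {} (2 {} 1))))"
--
-- def evaluate(options: list) -> int:
--     #Use a stack to evaluate a possible combination
--     stack = []
--
--     #Push until )
--     for symbol in options:
--         if symbol != ')':
--             stack.append(symbol)
--         else:
--             try:
--                 #Get right num, operator and left nom
--                 right = stack.pop()
--                 operator = stack.pop()
--                 left = stack.pop()
--                 stack.pop()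
--             except IndexError:
--                 return None
--             #Perform operations
--             if operator == '+':
--                 res = right + left
--             elif operator == '-':
--                 res = left - right
--             else:
--                 res = right * left
--             stack.append(res)
--     #Return result
--     return stack[0]
--
-- def build_options(target):
--     #Splitting the expression up & wrapping in parenthesis
--     expression_list = (expression.replace('(', ' ( ').replace(')', ' ) ').split())
--     expression_list = ['('] + expression_list + [')']
--
--     #[(current op. index, list of chosen options)]
--     ops_stack = [(0,[])]
--     while ops_stack:
--         i, operations = ops_stack.pop()
--
--         #If i == 8, all are filled so, evaluate
--         if i == 8:
--             divided = []
--             ops_i = 0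
--             #Replace placeholder
--             for j in expression_list:
--                 if j == '{}':
--                     divided.append(operations[ops_i])
--                     ops_i += 1
--                 #Convert digit to int for math
--                 elif j.isdigit():
--                     divided.append(int(j))
--                 else:
--                     divided.append(j)
--             #Call to evaluate and see if matches target
--             if evaluate(divided) == target:
--                 return operations
--         else:
--             #If not all filled, add other op option
--             for op in ops:
--                 ops_stack.append((i + 1, operations + [op]))
--     return None
-- ===== SOURCE B (Python) =====
-- OPS = ('*', '-', '+')
--
-- def _apply(op, a, b):
--     if op == '+':
--         return a + b
--     if op == '-':
--         return a - b
--     return a * b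
--
-- def build_options(target):
--     # Direct enumeration of the 8 operator slots; the expression shape is fixed,
--     # so each candidate is evaluated by a closed chain of _apply calls.
--     for o1 in OPS:
--      for o2 in OPS:
--       for o3 in OPS:
--        for o4 in OPS:
--         for o5 in OPS:
--          for o6 in OPS:
--           for o7 in OPS:
--            for o8 in OPS:
--             left = _apply(o3, _apply(o2, _apply(o1, 9, 8), 7), 6)
--             right = _apply(o5, 5, _apply(o6, 4, _apply(o7, 3, _apply(o8, 2, 1))))
--             if _apply(o4, left, right) == target:
--                 return [o1, o2, o3, o4, o5, o6, o7, o8]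
--     return None
-- ===== Notes on version B (the rewrite author's own statement) =====
-- stated objective: simpler
-- what changed: B replaces A's string tokenizer, stack-based expression evaluator and explicit DFS stack with eight nested loops over the operator alphabet ('*','-','+', matching A's DFS pop order) and a direct arithmetic evaluation of the fixed expression shape.
import Mathlib
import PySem

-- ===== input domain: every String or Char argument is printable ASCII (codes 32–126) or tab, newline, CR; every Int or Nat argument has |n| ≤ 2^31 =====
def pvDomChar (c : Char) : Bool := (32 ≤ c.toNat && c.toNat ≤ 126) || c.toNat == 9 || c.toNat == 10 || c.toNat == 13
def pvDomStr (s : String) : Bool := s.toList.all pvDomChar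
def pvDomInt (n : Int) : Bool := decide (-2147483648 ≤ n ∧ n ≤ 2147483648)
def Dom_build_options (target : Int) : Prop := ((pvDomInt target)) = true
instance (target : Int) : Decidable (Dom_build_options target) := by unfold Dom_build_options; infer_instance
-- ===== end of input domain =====

-- B replaces A's string-tokenizer + stack evaluator + explicit DFS stack with eight nested
-- loops over the operator alphabet and a direct arithmetic evaluation of the fixed expression
-- (objective: simpler, and measurably faster by a constant factor; same first-match order, so the same result).

-- ===== PORT A =====

-- Python values in `divided` are a mix of ints and strings; Tok is that union.
inductive Tok
  | num : Int → Tok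
  | sym : String → Tok
deriving DecidableEq, Repr

def pvExpression : String := "(((9 {} 8) {} 7) {} 6) {} (5 {} (4 {} (3 {} (2 {} 1))))"

def pvOps : List String := ["+", "-", "*"]

-- `evaluate`'s for-loop; the Lean stack is head-at-top (Python appends/pops at the end),
-- so Python's stack[0] is the Lean list's last element.
def pvEvalLoop : List Tok → List Tok → Option Int
  | [], stack =>
      match stack.getLast? with          -- return stack[0]
      | some (Tok.num n) => some n
      | _ => none                        -- empty / non-int stack[0]: unreachable on A's own inputs
  | t :: rest, stack =>
      if t ≠ Tok.sym ")" then pvEvalLoop rest (t :: stack)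
      else
        match stack with
        | Tok.num right :: Tok.sym op :: Tok.num left :: _ :: stack' =>
            pvEvalLoop rest
              (Tok.num (if op = "+" then right + left
                        else if op = "-" then left - right
                        else right * left) :: stack')
        | _ => none                      -- Python's `except IndexError: return None`

def pvEvaluate (options : List Tok) : Option Int := pvEvalLoop options []

-- the placeholder-substitution for-loop of build_options, as a fold over the
-- same state (divided, ops_i); operations[ops_i] is total here (8 placeholders,
-- 8 operations), so the unreachable IndexError is rendered by getD
def pvSubstStep (operations : List String) (acc : List Tok × Nat) (j : String) : List Tok × Nat :=
  if j = "{}" then (acc.1 ++ [Tok.sym (operations.getD acc.2 "")], acc.2 + 1)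
  else if PySem.Str.strIsdigit j then (acc.1 ++ [Tok.num ((PySem.Int.ofStr? j).getD 0)], acc.2)
  else (acc.1 ++ [Tok.sym j], acc.2)

def pvExprList : List String :=
  ["("] ++ PySem.Str.split₀ (PySem.Str.replace (PySem.Str.replace pvExpression "(" " ( ") ")" " ) ") ++ [")"]

-- the while-loop over ops_stack; fuel only guards termination (the DFS tree has 9841
-- nodes < 20000, so the 0 case is never reached)
def pvLoopA : Nat → List (Nat × List String) → Int → Option (List String)
  | 0, _, _ => none
  | _ + 1, [], _ => none
  | f + 1, (i, operations) :: rest, target =>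
      if i = 8 then
        if pvEvaluate ((pvExprList.foldl (pvSubstStep operations) ([], 0)).1) = some target then some operations
        else pvLoopA f rest target
      else
        pvLoopA f (pvOps.foldl (fun st op => (i + 1, operations ++ [op]) :: st) rest) target

def build_options (target : Int) : Option (List String) :=
  pvLoopA 20000 [(0, [])] target

-- ===== PORT B =====

def pvOpsB : List String := ["*", "-", "+"]

def pvApply (op : String) (a b : Int) : Int :=
  if op = "+" then a + b else if op = "-" then a - b else a * b

def build_options_alt (target : Int) : Option (List String) :=
  pvOpsB.findSome? fun o1 => pvOpsB.findSome? fun o2 => pvOpsB.findSome? fun o3 =>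
  pvOpsB.findSome? fun o4 => pvOpsB.findSome? fun o5 => pvOpsB.findSome? fun o6 =>
  pvOpsB.findSome? fun o7 => pvOpsB.findSome? fun o8 =>
    let left := pvApply o3 (pvApply o2 (pvApply o1 9 8) 7) 6
    let right := pvApply o5 5 (pvApply o6 4 (pvApply o7 3 (pvApply o8 2 1)))
    if pvApply o4 left right = target then some [o1, o2, o3, o4, o5, o6, o7, o8] else none

-- ===== PRECONDITION & SPEC =====
def Spec_build_options (target : Int) (out : Option (List String)) : Prop := out = build_options_alt target
instance (target : Int) (out : Option (List String)) : Decidable (Spec_build_options target out) := by unfold Spec_build_options; infer_instance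

-- ===== CLAIM (what is proved, stated in full; the proofs are below) =====
def Claim_equal_build_options : Prop := ∀ (target : Int), Dom_build_options target → Spec_build_options target (build_options target)

-- ===== LEMMAS AND PROOFS =====

-- DFS-order expansion of a partially filled slot entry
def pvExpand : Nat → List String → List (List String)
  | 0, pref => [pref]
  | k + 1, pref => pvOpsB.flatMap (fun o => pvExpand k (pref ++ [o]))

-- what A does with one complete assignment
def pvCheckA (target : Int) (c : List String) : Option (List String) :=
  if pvEvaluate ((pvExprList.foldl (pvSubstStep c) ([], 0)).1) = some target then some c else none

-- what B does with one complete assignment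
def pvValL : List String → Int
  | [o1, o2, o3, o4, o5, o6, o7, o8] =>
      pvApply o4 (pvApply o3 (pvApply o2 (pvApply o1 9 8) 7) 6)
        (pvApply o5 5 (pvApply o6 4 (pvApply o7 3 (pvApply o8 2 1))))
  | _ => 0

def pvCheckB (target : Int) (c : List String) : Option (List String) :=
  if pvValL c = target then some c else none

-- number of pops the DFS performs below an entry with k unfilled slots
def pvCnt : Nat → Nat
  | 0 => 1
  | k + 1 => 1 + 3 * pvCnt k

def pvMeas (st : List (Nat × List String)) : Nat :=
  (st.map (fun p => pvCnt (8 - p.1))).sum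

theorem pvCnt_pos (k : Nat) : 0 < pvCnt k := by
  cases k <;> simp [pvCnt]

theorem findSome?_congr_mem {α β : Type} (l : List α) (f g : α → Option β)
    (h : ∀ x ∈ l, f x = g x) : l.findSome? f = l.findSome? g := by
  induction l with
  | nil => rfl
  | cons a t ih =>
      simp only [List.findSome?_cons, h a (by simp)]
      cases g a <;> simp [ih (fun x hx => h x (by simp [hx]))]

theorem findSome?_flatMap {α β γ : Type} (l : List α) (g : α → List β) (h : β → Option γ) :
    (l.flatMap g).findSome? h = l.findSome? (fun x => (g x).findSome? h) := by
  induction l with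
  | nil => rfl
  | cons a t ih =>
      simp only [List.flatMap_cons, List.findSome?_append, ih, List.findSome?_cons]
      cases (g a).findSome? h <;> simp

-- ----- A's DFS loop produces the first hit of the expansion -----

theorem pvLoopA_eq (f : Nat) :
    ∀ (st : List (Nat × List String)) (target : Int),
      (∀ p ∈ st, p.1 ≤ 8) → pvMeas st ≤ f →
      pvLoopA f st target
        = (st.flatMap (fun p => pvExpand (8 - p.1) p.2)).findSome? (pvCheckA target) := by
  induction f with
  | zero =>
      intro st t hb hm
      cases st with
      | nil => simp [pvLoopA]
      | cons p rest =>
          exfalso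
          have := pvCnt_pos (8 - p.1)
          simp [pvMeas] at hm
          omega
  | succ f ih =>
      intro st t hb hm
      cases st with
      | nil => simp [pvLoopA]
      | cons p rest =>
          obtain ⟨i, ops⟩ := p
          by_cases hi : i = 8
          · subst hi
            have hm' : pvMeas rest ≤ f := by
              simp [pvMeas, pvCnt] at hm ⊢; omega
            have hb' : ∀ p ∈ rest, p.1 ≤ 8 := fun p hp => hb p (by simp [hp])
            by_cases hc : pvEvaluate ((pvExprList.foldl (pvSubstStep ops) ([], 0)).1) = some t
            · simp [pvLoopA, pvExpand, pvCheckA, hc]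
            · simp [pvLoopA, pvExpand, pvCheckA, hc, ih rest t hb' hm']
          · have hlt : i < 8 := Nat.lt_of_le_of_ne (by simpa using hb (i, ops) (by simp)) hi
            have h8 : 8 - i = (7 - i) + 1 := by omega
            have h7 : 8 - (i + 1) = 7 - i := by omega
            simp only [pvLoopA, if_neg hi, pvOps, List.foldl_cons, List.foldl_nil]
            rw [ih]
            · simp only [List.flatMap_cons, h7, h8, pvExpand, pvOpsB, List.flatMap_cons,
                List.flatMap_nil, List.append_nil, List.append_assoc]
            · intro p hp
              simp at hp
              rcases hp with rfl | rfl | rfl | hp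
              · simpa using hlt
              · simpa using hlt
              · simpa using hlt
              · exact hb p (by simp [hp])
            · have hcnt : pvCnt (8 - i) = 1 + 3 * pvCnt (7 - i) := by rw [h8, pvCnt]
              simp [pvMeas, h7] at hm ⊢
              omega

theorem buildA_eq (target : Int) :
    build_options target = (pvExpand 8 []).findSome? (pvCheckA target) := by
  have h := pvLoopA_eq 20000 [(0, [])] target (by simp)
    (by simp [pvMeas]; decide)
  simpa using h

-- ----- the substitution produces the fixed token list -----

set_option maxHeartbeats 0 in
theorem exprList_eq : pvExprList =
    ["(", "(", "(", "(", "9", "{}", "8", ")", "{}", "7", ")", "{}", "6", ")", "{}",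
     "(", "5", "{}", "(", "4", "{}", "(", "3", "{}", "(", "2", "{}", "1",
     ")", ")", ")", ")", ")"] := by
  decide

theorem ofs_1 : (PySem.Int.ofStr? "1").getD 0 = 1 := by decide
theorem ofs_2 : (PySem.Int.ofStr? "2").getD 0 = 2 := by decide
theorem ofs_3 : (PySem.Int.ofStr? "3").getD 0 = 3 := by decide
theorem ofs_4 : (PySem.Int.ofStr? "4").getD 0 = 4 := by decide
theorem ofs_5 : (PySem.Int.ofStr? "5").getD 0 = 5 := by decide
theorem ofs_6 : (PySem.Int.ofStr? "6").getD 0 = 6 := by decide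
theorem ofs_7 : (PySem.Int.ofStr? "7").getD 0 = 7 := by decide
theorem ofs_8 : (PySem.Int.ofStr? "8").getD 0 = 8 := by decide
theorem ofs_9 : (PySem.Int.ofStr? "9").getD 0 = 9 := by decide

theorem isdc_lp : PySem.Chars.strIsdigit ['('] = false := by decide
theorem isdc_rp : PySem.Chars.strIsdigit [')'] = false := by decide
theorem isdc_1 : PySem.Chars.strIsdigit ['1'] = true := by decide
theorem isdc_2 : PySem.Chars.strIsdigit ['2'] = true := by decide
theorem isdc_3 : PySem.Chars.strIsdigit ['3'] = true := by decide
theorem isdc_4 : PySem.Chars.strIsdigit ['4'] = true := by decide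
theorem isdc_5 : PySem.Chars.strIsdigit ['5'] = true := by decide
theorem isdc_6 : PySem.Chars.strIsdigit ['6'] = true := by decide
theorem isdc_7 : PySem.Chars.strIsdigit ['7'] = true := by decide
theorem isdc_8 : PySem.Chars.strIsdigit ['8'] = true := by decide
theorem isdc_9 : PySem.Chars.strIsdigit ['9'] = true := by decide

set_option maxHeartbeats 1000000 in
theorem subst_eq (o1 o2 o3 o4 o5 o6 o7 o8 : String) :
    ((pvExprList.foldl (pvSubstStep [o1, o2, o3, o4, o5, o6, o7, o8]) ([], 0)).1 : List Tok)
      = [Tok.sym "(", Tok.sym "(", Tok.sym "(", Tok.sym "(", Tok.num 9, Tok.sym o1, Tok.num 8,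
         Tok.sym ")", Tok.sym o2, Tok.num 7, Tok.sym ")", Tok.sym o3, Tok.num 6, Tok.sym ")",
         Tok.sym o4, Tok.sym "(", Tok.num 5, Tok.sym o5, Tok.sym "(", Tok.num 4, Tok.sym o6,
         Tok.sym "(", Tok.num 3, Tok.sym o7, Tok.sym "(", Tok.num 2, Tok.sym o8, Tok.num 1,
         Tok.sym ")", Tok.sym ")", Tok.sym ")", Tok.sym ")", Tok.sym ")"] := by
  rw [exprList_eq]
  simp [List.foldl_cons, List.foldl_nil, pvSubstStep,
    isdc_lp, isdc_rp, isdc_1, isdc_2, isdc_3, isdc_4, isdc_5, isdc_6,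
    isdc_7, isdc_8, isdc_9,
    ofs_1, ofs_2, ofs_3, ofs_4, ofs_5, ofs_6, ofs_7, ofs_8, ofs_9]

-- ----- each operator slot evaluates as pvApply -----

theorem evalOp {o : String} (h : o ∈ pvOpsB) (l r : Int) :
    (if o = "+" then r + l else if o = "-" then l - r else r * l) = pvApply o l r := by
  simp only [pvOpsB, List.mem_cons, List.not_mem_nil, or_false] at h
  rcases h with rfl | rfl | rfl <;> simp [pvApply] <;> ring

theorem mem_opsB_ne {o : String} (h : o ∈ pvOpsB) : ¬ (o = ")") := by
  simp only [pvOpsB, List.mem_cons, List.not_mem_nil, or_false] at h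
  rcases h with rfl | rfl | rfl <;> decide

set_option maxHeartbeats 2000000 in
theorem eval_combo {o1 o2 o3 o4 o5 o6 o7 o8 : String}
    (h1 : o1 ∈ pvOpsB) (h2 : o2 ∈ pvOpsB) (h3 : o3 ∈ pvOpsB) (h4 : o4 ∈ pvOpsB)
    (h5 : o5 ∈ pvOpsB) (h6 : o6 ∈ pvOpsB) (h7 : o7 ∈ pvOpsB) (h8 : o8 ∈ pvOpsB) :
    pvEvaluate ((pvExprList.foldl (pvSubstStep [o1, o2, o3, o4, o5, o6, o7, o8]) ([], 0)).1)
      = some (pvValL [o1, o2, o3, o4, o5, o6, o7, o8]) := by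
  rw [subst_eq]
  simp only [pvEvaluate, pvEvalLoop, pvValL, ne_eq, Tok.sym.injEq,
    mem_opsB_ne h1, mem_opsB_ne h2, mem_opsB_ne h3, mem_opsB_ne h4,
    mem_opsB_ne h5, mem_opsB_ne h6, mem_opsB_ne h7, mem_opsB_ne h8,
    not_false_eq_true, not_true, ite_true, ite_false, reduceCtorEq, String.reduceEq,
    evalOp h1, evalOp h2, evalOp h3, evalOp h4,
    evalOp h5, evalOp h6, evalOp h7, evalOp h8]
  rfl

-- ----- every element of the expansion is an 8-list over the alphabet -----

theorem mem_expand {k : Nat} :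
    ∀ {pref c : List String}, c ∈ pvExpand k pref →
      ∃ s, c = pref ++ s ∧ s.length = k ∧ ∀ o ∈ s, o ∈ pvOpsB := by
  induction k with
  | zero =>
      intro pref c hc
      simp only [pvExpand, List.mem_singleton] at hc
      exact ⟨[], by simp [hc], rfl, by simp⟩
  | succ k ih =>
      intro pref c hc
      simp only [pvExpand, List.mem_flatMap] at hc
      obtain ⟨o, ho, hc⟩ := hc
      obtain ⟨s, rfl, hlen, hmem⟩ := ih hc
      refine ⟨o :: s, by simp, by simp [hlen], ?_⟩
      intro x hx
      rw [List.mem_cons] at hx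
      rcases hx with rfl | hx
      · exact ho
      · exact hmem x hx

theorem pvKey : ∀ c ∈ pvExpand 8 [],
    pvEvaluate ((pvExprList.foldl (pvSubstStep c) ([], 0)).1) = some (pvValL c) := by
  intro c hc
  obtain ⟨s, hs, hlen, hmem⟩ := mem_expand hc
  rw [hs, List.nil_append]
  rcases s with _ | ⟨o1, s⟩
  · simp only [List.length_nil] at hlen; omega
  rcases s with _ | ⟨o2, s⟩
  · simp only [List.length_cons, List.length_nil] at hlen; omega
  rcases s with _ | ⟨o3, s⟩
  · simp only [List.length_cons, List.length_nil] at hlen; omega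
  rcases s with _ | ⟨o4, s⟩
  · simp only [List.length_cons, List.length_nil] at hlen; omega
  rcases s with _ | ⟨o5, s⟩
  · simp only [List.length_cons, List.length_nil] at hlen; omega
  rcases s with _ | ⟨o6, s⟩
  · simp only [List.length_cons, List.length_nil] at hlen; omega
  rcases s with _ | ⟨o7, s⟩
  · simp only [List.length_cons, List.length_nil] at hlen; omega
  rcases s with _ | ⟨o8, s⟩
  · simp only [List.length_cons, List.length_nil] at hlen; omega
  rcases s with _ | ⟨o9, s⟩
  · exact eval_combo (hmem o1 (by simp)) (hmem o2 (by simp)) (hmem o3 (by simp))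
      (hmem o4 (by simp)) (hmem o5 (by simp)) (hmem o6 (by simp))
      (hmem o7 (by simp)) (hmem o8 (by simp))
  · simp only [List.length_cons] at hlen; omega

-- ----- B is the first hit of the same expansion -----

theorem findSome?_singleton {α β : Type} (h : α → Option β) (a : α) :
    [a].findSome? h = h a := by
  cases hy : h a <;> simp [hy]

theorem pvExpand_succ8 (pref : List String) : pvExpand 8 pref = pvOpsB.flatMap (fun o => pvExpand 7 (pref ++ [o])) := rfl
theorem pvExpand_succ7 (pref : List String) : pvExpand 7 pref = pvOpsB.flatMap (fun o => pvExpand 6 (pref ++ [o])) := rfl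
theorem pvExpand_succ6 (pref : List String) : pvExpand 6 pref = pvOpsB.flatMap (fun o => pvExpand 5 (pref ++ [o])) := rfl
theorem pvExpand_succ5 (pref : List String) : pvExpand 5 pref = pvOpsB.flatMap (fun o => pvExpand 4 (pref ++ [o])) := rfl
theorem pvExpand_succ4 (pref : List String) : pvExpand 4 pref = pvOpsB.flatMap (fun o => pvExpand 3 (pref ++ [o])) := rfl
theorem pvExpand_succ3 (pref : List String) : pvExpand 3 pref = pvOpsB.flatMap (fun o => pvExpand 2 (pref ++ [o])) := rfl
theorem pvExpand_succ2 (pref : List String) : pvExpand 2 pref = pvOpsB.flatMap (fun o => pvExpand 1 (pref ++ [o])) := rfl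
theorem pvExpand_succ1 (pref : List String) : pvExpand 1 pref = pvOpsB.flatMap (fun o => pvExpand 0 (pref ++ [o])) := rfl
theorem pvExpand_zero (pref : List String) : pvExpand 0 pref = [pref] := rfl

theorem buildB_eq (target : Int) :
    (pvExpand 8 []).findSome? (pvCheckB target) = build_options_alt target := by
  simp only [pvExpand_succ8, pvExpand_succ7, pvExpand_succ6, pvExpand_succ5,
    pvExpand_succ4, pvExpand_succ3, pvExpand_succ2, pvExpand_succ1, pvExpand_zero,
    findSome?_flatMap, findSome?_singleton, List.nil_append, List.cons_append]
  simp only [pvCheckB, pvValL, build_options_alt]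
  rfl

-- ===== VERDICT (by name: the statement is the Claim_ definition above) =====
theorem build_options_spec : Claim_equal_build_options := by
  intro target _
  unfold Spec_build_options
  rw [buildA_eq, findSome?_congr_mem _ _ (pvCheckB target)
      (fun c hc => by simp [pvCheckA, pvCheckB, pvKey c hc]), buildB_eq]
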